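-- pv_equiv track=rewrite | github.com/joshuajacksonboggs/PythonRecursion | recursion.py | count_hi2
-- ===== SOURCE A (Python) =====
-- def count_hi2(input_string):
--   if len(input_string) == 1:
--     return 0
--   elif len(input_string) == 2:
--     if input_string == "hi":
--       return 1
--     return 0
--   elif len(input_string) > 2:
--     if "hi" in input_string[0:3]:
--       if input_string[0] == "x":
--         return 0 + count_hi2(input_string[2:])
--       return 1 + count_hi2(input_string[2:])
--     return 0 + count_hi2(input_string[1:])
-- ===== SOURCE B (Python) =====
-- def count_hi2(input_string):
--     total = 0
--     p2 = ''
--     p1 = ''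
--     for c in input_string:
--         if p1 == 'h' and c == 'i' and p2 != 'x':
--             total += 1
--         p2, p1 = p1, c
--     return total
-- ===== Notes on version B (the rewrite author's own statement) =====
-- stated objective: faster
-- what changed: Replaced the O(n^2) recursion with slicing and windowed substring search by a single linear fold that keeps the last two characters as state and counts each 'hi' pair not preceded by 'x'.
-- outside the precondition, e.g. on count_hi2(''): A returns None, B returns 0
import Mathlib
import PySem

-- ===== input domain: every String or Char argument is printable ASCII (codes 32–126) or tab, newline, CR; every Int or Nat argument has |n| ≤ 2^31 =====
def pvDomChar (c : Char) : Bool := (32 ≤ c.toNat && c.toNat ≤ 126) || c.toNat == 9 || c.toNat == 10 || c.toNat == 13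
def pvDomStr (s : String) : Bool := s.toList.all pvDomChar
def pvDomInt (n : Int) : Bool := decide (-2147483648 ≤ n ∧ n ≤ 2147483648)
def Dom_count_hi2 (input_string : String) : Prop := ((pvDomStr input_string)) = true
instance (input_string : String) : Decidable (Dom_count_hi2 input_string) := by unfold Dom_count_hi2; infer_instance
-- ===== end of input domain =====

-- B replaces A's quadratic slicing recursion by one linear fold over the characters
-- that remembers the previous two characters; Pre_ excludes only the empty string,
-- on which A returns None (no int).


-- ===== PORT A =====
-- literal transliteration of A on the character list; the final `else 0` is the
-- len == 0 case, where Python A falls through and returns None (excluded by Pre_).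
def count_hi2A (l : List Char) : Int :=
  if l.length = 1 then 0
  else if l.length = 2 then
    (if l = ['h', 'i'] then 1 else 0)
  else if l.length > 2 then
    if PySem.Chars.isIn ['h', 'i'] (PySem.List.slice l (some 0) (some 3)) then
      if PySem.List.pyGet? l 0 = some 'x' then
        0 + count_hi2A (PySem.List.slice l (some 2) none)
      else
        1 + count_hi2A (PySem.List.slice l (some 2) none)
    else
      0 + count_hi2A (PySem.List.slice l (some 1) none)
  else 0
termination_by l.length
decreasing_by
  · rw [PySem.List.slice_from _ (show (0:Int) ≤ 2 by norm_num)]; simp; omega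
  · rw [PySem.List.slice_from _ (show (0:Int) ≤ 2 by norm_num)]; simp; omega
  · rw [PySem.List.slice_from _ (show (0:Int) ≤ 1 by norm_num)]; simp; omega

def count_hi2 (input_string : String) : Int := count_hi2A input_string.toList

-- ===== PORT B =====
-- Source B: one pass; state is (total, p2, p1) = (count so far, char two back, previous char).
def count_hi2_alt (input_string : String) : Int :=
  (input_string.toList.foldl
    (fun st c =>
      ((if st.2.2 = some 'h' ∧ c = 'i' ∧ st.2.1 ≠ some 'x' then st.1 + 1 else st.1),
        st.2.2, some c))
    ((0 : Int), (none : Option Char), (none : Option Char))).1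

-- ===== PRECONDITION & SPEC =====
-- Pre_ excludes exactly the empty string, on which A falls through every branch and
-- returns None rather than an int.
def Pre_count_hi2 (input_string : String) : Prop := input_string.toList ≠ []
instance (input_string : String) : Decidable (Pre_count_hi2 input_string) := by unfold Pre_count_hi2; infer_instance
def pvWitness_count_hi2 : String := "xhihi"

def Spec_count_hi2 (input_string : String) (out : Int) : Prop := out = count_hi2_alt input_string
instance (input_string : String) (out : Int) : Decidable (Spec_count_hi2 input_string out) := by unfold Spec_count_hi2; infer_instance

-- ===== CLAIM (what is proved, stated in full; the proofs are below) =====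
def Claim_equal_count_hi2 : Prop := ∀ (input_string : String), Dom_count_hi2 input_string → Pre_count_hi2 input_string → Spec_count_hi2 input_string (count_hi2 input_string)

-- ===== LEMMAS AND PROOFS =====

-- the count B computes, as a recursion: pairs (p1, c) with p1 = 'h', c = 'i', p2 ≠ 'x'
def cnt (p2 p1 : Option Char) (l : List Char) : Int :=
  match l with
  | [] => 0
  | c :: rest => (if p1 = some 'h' ∧ c = 'i' ∧ p2 ≠ some 'x' then 1 else 0) + cnt p1 (some c) rest

theorem foldl_eq_cnt (l : List Char) (t : Int) (p2 p1 : Option Char) :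
    (l.foldl
      (fun st c =>
        ((if st.2.2 = some 'h' ∧ c = 'i' ∧ st.2.1 ≠ some 'x' then st.1 + 1 else st.1),
          st.2.2, some c))
      (t, p2, p1)).1 = t + cnt p2 p1 l := by
  induction l generalizing t p2 p1 with
  | nil => simp [cnt]
  | cons c rest ih =>
    simp only [List.foldl_cons, cnt]
    rw [ih]
    split_ifs <;> ring

theorem cnt_congr (l : List Char) (p2 p1 q2 q1 : Option Char)
    (h1 : p1 = some 'h' ↔ q1 = some 'h') (h2 : p1 = some 'x' ↔ q1 = some 'x')
    (h3 : p2 = some 'x' ↔ q2 = some 'x') :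
    cnt p2 p1 l = cnt q2 q1 l := by
  induction l generalizing p2 p1 q2 q1 with
  | nil => rfl
  | cons c rest ih =>
    simp only [cnt]
    have hcond : (p1 = some 'h' ∧ c = 'i' ∧ p2 ≠ some 'x') ↔
        (q1 = some 'h' ∧ c = 'i' ∧ q2 ≠ some 'x') := by
      constructor <;> rintro ⟨ha, hb, hc⟩ <;> exact ⟨by tauto, hb, by tauto⟩
    rw [if_congr hcond rfl rfl, ih p1 (some c) q1 (some c) Iff.rfl Iff.rfl h2]

theorem hiIn3 (a b c : Char) :
    PySem.Chars.isIn ['h', 'i'] [a, b, c] = true ↔ (a = 'h' ∧ b = 'i') ∨ (b = 'h' ∧ c = 'i') := by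
  rw [PySem.Chars.isIn_iff_infix]
  constructor
  · rintro ⟨s, t, h⟩
    match s, t, h with
    | [], t, h => left; simp at h; exact ⟨h.1.symm, h.2.1.symm⟩
    | [x], t, h => right; simp at h; exact ⟨h.2.1.symm, h.2.2.1.symm⟩
    | x :: y :: z :: s', t, h =>
      exfalso
      have := congrArg List.length h
      simp at this
  · rintro (⟨ha, hb⟩ | ⟨hb, hc⟩)
    · exact ⟨[], [c], by simp [ha, hb]⟩
    · exact ⟨[a], [], by simp [hb, hc]⟩

theorem countA_eq_cnt (l : List Char) (hne : l ≠ []) : count_hi2A l = cnt none none l := by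
  induction hl : l.length using Nat.strong_induction_on generalizing l with
  | _ n ih =>
  subst hl
  match l, hne with
  | [a], _ => rw [count_hi2A]; simp [cnt]
  | [a, b], _ =>
    rw [count_hi2A]
    norm_num
    by_cases h : a = 'h' ∧ b = 'i'
    · obtain ⟨rfl, rfl⟩ := h; simp [cnt]
    · rw [if_neg (by simp; tauto)]
      simp only [cnt]
      rw [if_neg (by simp), if_neg (by simp; tauto)]
      simp
  | a :: b :: c :: rest, _ =>
    rw [count_hi2A]
    have hslice3 : PySem.List.slice (a :: b :: c :: rest) (some 0) (some 3) = [a, b, c] := by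
      rw [PySem.List.slice_zero_start, PySem.List.slice_to _ (show (0:Int) ≤ 3 by norm_num)]; rfl
    have hslice2 : PySem.List.slice (a :: b :: c :: rest) (some 2) none = c :: rest := by
      rw [PySem.List.slice_from _ (show (0:Int) ≤ 2 by norm_num)]; rfl
    have hslice1 : PySem.List.slice (a :: b :: c :: rest) (some 1) none = b :: c :: rest := by
      rw [PySem.List.slice_from _ (show (0:Int) ≤ 1 by norm_num)]; rfl
    have hget : PySem.List.pyGet? (a :: b :: c :: rest) 0 = some a := by
      simp [PySem.List.pyGet?, PySem.List.pyIdx?]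
      rw [if_pos (by positivity)]; simp
    rw [if_neg (by simp), if_neg (by simp), if_pos (by simp), hslice3, hslice2, hslice1, hget]
    have ihc : count_hi2A (c :: rest) = cnt none none (c :: rest) :=
      ih (c :: rest).length (by simp) _ (by simp) rfl
    have ihb : count_hi2A (b :: c :: rest) = cnt none none (b :: c :: rest) :=
      ih (b :: c :: rest).length (by simp) _ (by simp) rfl
    by_cases hab : a = 'h' ∧ b = 'i'
    · -- "hi" at the front of the window; a = 'h' ≠ 'x', so it is counted and 2 are dropped
      obtain ⟨rfl, rfl⟩ := hab
      rw [if_pos ((hiIn3 _ _ _).mpr (Or.inl ⟨rfl, rfl⟩)), if_neg (by simp), ihc]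
      simp only [cnt]
      rw [cnt_congr rest (some 'i') (some c) none (some c) Iff.rfl Iff.rfl (by decide)]
      simp
    · by_cases hbc : b = 'h' ∧ c = 'i'
      · obtain ⟨rfl, rfl⟩ := hbc
        by_cases hax : a = 'x'
        · -- window is "xhi": the pair is skipped
          subst hax
          rw [if_pos ((hiIn3 _ _ _).mpr (Or.inr ⟨rfl, rfl⟩)), if_pos rfl, ihc]
          simp only [cnt]
          rw [cnt_congr rest (some 'h') (some 'i') none (some 'i') Iff.rfl Iff.rfl (by decide)]
          simp
        · -- "hi" at position 1, not preceded by 'x': counted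
          rw [if_pos ((hiIn3 _ _ _).mpr (Or.inr ⟨rfl, rfl⟩)), if_neg (by simp [hax]), ihc]
          simp only [cnt]
          rw [cnt_congr rest (some 'h') (some 'i') none (some 'i') Iff.rfl Iff.rfl (by decide)]
          simp [hax]
      · -- no "hi" in the window: drop one character
        rw [if_neg (by rw [hiIn3]; tauto), ihb]
        simp only [cnt]
        have h1 : ¬(some b = some 'h' ∧ c = 'i' ∧ (none : Option Char) ≠ some 'x') := by
          simp; tauto
        have h2 : ¬(some b = some 'h' ∧ c = 'i' ∧ some a ≠ some 'x') := by simp; tauto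
        have h3 : ¬(some a = some 'h' ∧ b = 'i' ∧ (none : Option Char) ≠ some 'x') := by
          simp; tauto
        rw [if_neg h1, if_neg h2, if_neg h3]
        simp

-- ===== VERDICT (by name: the statement is the Claim_ definition above) =====
theorem count_hi2_spec : Claim_equal_count_hi2 := by
  intro s _ hpre
  unfold Spec_count_hi2 count_hi2 count_hi2_alt
  rw [foldl_eq_cnt, countA_eq_cnt s.toList hpre]
  ring
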